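-- pv_equiv track=rewrite | github.com/CCRAB1/CCRABDashBoard | projects_catalog/views.py | _normalized_keywords
-- ===== SOURCE A (Python) =====
-- def _normalized_keywords(value):
--     items = []
--     if isinstance(value, list):
--         for keyword in value:
--             keyword_text = str(keyword).strip()
--             if keyword_text:
--                 items.append(keyword_text)
--         return items
--
--     if isinstance(value, str):
--         for keyword in value.split(","):
--             keyword_text = keyword.strip()
--             if keyword_text:
--                 items.append(keyword_text)
--         return items
--
--     return items
-- ===== SOURCE B (Python) =====
-- def _normalized_keywords(value):
--     if isinstance(value, list):
--         return [t for t in (str(k).strip() for k in value) if t]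
--     if not isinstance(value, str):
--         return []
--     items = []
--     buf = []
--     for ch in value:
--         if ch == ',':
--             t = ''.join(buf).strip()
--             if t:
--                 items.append(t)
--             buf = []
--         else:
--             buf.append(ch)
--     t = ''.join(buf).strip()
--     if t:
--         items.append(t)
--     return items
-- ===== Notes on version B (the rewrite author's own statement) =====
-- stated objective: alternative
-- what changed: Replaces split(',')-then-clean looping with a single character-level scan that accumulates each token in a buffer and flushes it (strip + keep-if-nonempty) at every comma and at end of string; the list branch becomes one comprehension.
import Mathlib
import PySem

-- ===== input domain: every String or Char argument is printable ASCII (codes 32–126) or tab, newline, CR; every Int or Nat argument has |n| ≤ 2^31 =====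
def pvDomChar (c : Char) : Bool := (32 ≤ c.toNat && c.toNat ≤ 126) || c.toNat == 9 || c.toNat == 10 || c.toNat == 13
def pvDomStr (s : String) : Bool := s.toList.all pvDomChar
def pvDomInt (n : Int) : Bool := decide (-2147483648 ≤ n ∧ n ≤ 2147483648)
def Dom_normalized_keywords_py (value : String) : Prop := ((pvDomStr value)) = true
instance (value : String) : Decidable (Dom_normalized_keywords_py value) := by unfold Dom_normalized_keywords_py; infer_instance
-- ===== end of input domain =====

-- ===== PORT A =====
-- A (str branch): loop over value.split(","), strip each piece, append if non-empty.
-- (A mutates no argument; the list/other-type branches are unreachable for a String argument.)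
def normalized_keywords_py (value : String) : List String :=
  (PySem.Chars.splitOn value.toList [',']).foldl
    (fun items keyword =>
      let keyword_text := PySem.Chars.strip keyword
      if keyword_text ≠ [] then items ++ [String.ofList keyword_text] else items) []

-- ===== PORT B =====
-- B: one character-level scan; buf holds the current token, flushed at ',' and at the end.
def nkFlush (items : List String) (buf : List Char) : List String :=
  let t := PySem.Chars.strip buf
  if t ≠ [] then items ++ [String.ofList t] else items

def nkScan : List Char → List String → List Char → List String
  | [], items, buf => nkFlush items buf
  | c :: cs, items, buf =>
    if c = ',' then nkScan cs (nkFlush items buf) []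
    else nkScan cs items (buf ++ [c])

def normalized_keywords_py_alt (value : String) : List String :=
  nkScan value.toList [] []

-- ===== PRECONDITION & SPEC =====
def Spec_normalized_keywords_py (value : String) (out : List String) : Prop := out = normalized_keywords_py_alt value
instance (value : String) (out : List String) : Decidable (Spec_normalized_keywords_py value out) := by unfold Spec_normalized_keywords_py; infer_instance

-- ===== CLAIM (what is proved, stated in full; the proofs are below) =====
def Claim_equal_normalized_keywords_py : Prop := ∀ (value : String), Dom_normalized_keywords_py value → Spec_normalized_keywords_py value (normalized_keywords_py value)

-- ===== LEMMAS AND PROOFS =====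

-- A's per-piece step, named for the proofs.
def nkStep (items : List String) (keyword : List Char) : List String :=
  let keyword_text := PySem.Chars.strip keyword
  if keyword_text ≠ [] then items ++ [String.ofList keyword_text] else items

theorem nkStep_eq_flush (items : List String) (buf : List Char) :
    nkStep items buf = nkFlush items buf := rfl

-- splitOn.go ignores the exact fuel (as long as it suffices) and moves acc out front.
theorem go_acc_fuel (l : List Char) :
    ∀ (f₁ f₂ : Nat) (cur : List Char) (accs : List (List Char)),
      l.length < f₁ → l.length < f₂ →
      PySem.Chars.splitOn.go [','] f₁ l cur accs =
        accs.reverse ++ PySem.Chars.splitOn.go [','] f₂ l cur [] := by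
  induction l with
  | nil =>
    intro f₁ f₂ cur accs h₁ h₂
    match f₁, h₁, f₂, h₂ with
    | f₁ + 1, _, f₂ + 1, _ => simp [PySem.Chars.splitOn.go]
  | cons c rest ih =>
    intro f₁ f₂ cur accs h₁ h₂
    match f₁, h₁, f₂, h₂ with
    | f₁ + 1, h₁, f₂ + 1, h₂ =>
      by_cases hc : c = ','
      · subst hc
        simp only [List.length_cons] at h₁ h₂
        simp only [PySem.Chars.splitOn.go, List.isPrefixOf, BEq.rfl, Bool.true_and,
          if_true, List.length, List.drop]
        rw [ih f₁ f₂ [] (cur.reverse :: accs) (by omega) (by omega),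
            ih f₂ f₂ [] [cur.reverse] (by omega) (by omega)]
        simp
      · have hpre : [','].isPrefixOf (c :: rest) = false := by
          simp [List.isPrefixOf]; intro h; exact hc h.symm
        simp only [List.length_cons] at h₁ h₂
        simp only [PySem.Chars.splitOn.go, hpre, Bool.false_eq_true, ite_false]
        exact ih f₁ f₂ (c :: cur) accs (by omega) (by omega)

-- a comma-free tail is one single piece
theorem go_no_comma (l : List Char) :
    ∀ (f : Nat) (cur : List Char) (accs : List (List Char)),
      l.length < f → ',' ∉ l →
      PySem.Chars.splitOn.go [','] f l cur accs = accs.reverse ++ [cur.reverse ++ l] := by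
  induction l with
  | nil =>
    intro f cur accs hf _
    match f, hf with
    | f + 1, _ => simp [PySem.Chars.splitOn.go]
  | cons c rest ih =>
    intro f cur accs hf hmem
    match f, hf with
    | f + 1, hf =>
      have hc : c ≠ ',' := fun h => hmem (h ▸ List.mem_cons_self ..)
      have hpre : [','].isPrefixOf (c :: rest) = false := by
        simp [List.isPrefixOf]; intro h; exact hc h.symm
      simp only [PySem.Chars.splitOn.go, hpre, Bool.false_eq_true, ite_false]
      rw [ih f (c :: cur) accs (by simp at hf ⊢; omega)
            (fun h => hmem (List.mem_cons_of_mem _ h))]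
      simp

-- peeling a comma-free head piece off splitOn
theorem go_head_piece (buf : List Char) :
    ∀ (cs : List Char) (f : Nat) (cur : List Char) (accs : List (List Char)),
      ',' ∉ buf → buf.length + 1 + cs.length < f →
      PySem.Chars.splitOn.go [','] f (buf ++ ',' :: cs) cur accs =
        accs.reverse ++ (cur.reverse ++ buf) :: PySem.Chars.splitOn cs [','] := by
  induction buf with
  | nil =>
    intro cs f cur accs _ hf
    match f, hf with
    | f + 1, hf =>
      simp only [List.nil_append, PySem.Chars.splitOn.go, List.isPrefixOf, BEq.rfl,
        Bool.true_and, if_true, List.length, List.drop]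
      rw [go_acc_fuel cs f (cs.length + 1) [] (cur.reverse :: accs)
            (by simp at hf; omega) (by omega)]
      simp [PySem.Chars.splitOn]
  | cons b bs ih =>
    intro cs f cur accs hmem hf
    match f, hf with
    | f + 1, hf =>
      have hb : b ≠ ',' := fun h => hmem (h ▸ List.mem_cons_self ..)
      have hpre : [','].isPrefixOf (b :: (bs ++ ',' :: cs)) = false := by
        simp [List.isPrefixOf]; intro h; exact hb h.symm
      simp only [List.cons_append, PySem.Chars.splitOn.go, hpre, Bool.false_eq_true, ite_false]
      rw [ih cs f (b :: cur) accs (fun h => hmem (List.mem_cons_of_mem _ h))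
            (by simp at hf ⊢; omega)]
      simp

theorem splitOn_no_comma (buf : List Char) (h : ',' ∉ buf) :
    PySem.Chars.splitOn buf [','] = [buf] := by
  rw [PySem.Chars.splitOn, go_no_comma buf (buf.length + 1) [] [] (by omega) h]
  simp

theorem splitOn_cons (buf cs : List Char) (h : ',' ∉ buf) :
    PySem.Chars.splitOn (buf ++ ',' :: cs) [','] = buf :: PySem.Chars.splitOn cs [','] := by
  rw [PySem.Chars.splitOn, go_head_piece buf cs _ [] [] h (by simp; omega)]
  simp

-- the scanner computes A's fold over the pieces of the remaining input
theorem nkScan_eq_foldl (cs : List Char) :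
    ∀ (items : List String) (buf : List Char), ',' ∉ buf →
      nkScan cs items buf = (PySem.Chars.splitOn (buf ++ cs) [',']).foldl nkStep items := by
  induction cs with
  | nil =>
    intro items buf hb
    rw [nkScan, List.append_nil, splitOn_no_comma buf hb]
    simp [List.foldl, nkStep_eq_flush]
  | cons c rest ih =>
    intro items buf hb
    by_cases hc : c = ','
    · subst hc
      rw [nkScan, if_pos rfl, splitOn_cons buf rest hb, List.foldl_cons,
        nkStep_eq_flush, ih (nkFlush items buf) [] (by simp)]
      simp
    · rw [nkScan, if_neg hc,
        ih items (buf ++ [c]) (by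
          intro h
          rcases List.mem_append.1 h with h | h
          · exact hb h
          · simp at h; exact hc h.symm)]
      simp

-- ===== VERDICT (by name: the statement is the Claim_ definition above) =====
theorem normalized_keywords_py_spec : Claim_equal_normalized_keywords_py := by
  intro value _
  show normalized_keywords_py value = normalized_keywords_py_alt value
  rw [normalized_keywords_py_alt, nkScan_eq_foldl value.toList [] [] (by simp)]
  rfl
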